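-- pv_equiv track=rewrite | github.com/Nabin077/Operating-System | LOOK.py | look_disk_scheduling
-- ===== SOURCE A (Python) =====
-- def look_disk_scheduling(requests, head, direction):
--     # Separate requests into two lists: those less than the head and those greater than or equal to the head
--     left = [r for r in requests if r < head]
--     right = [r for r in requests if r >= head]
--     # Sort the lists
--     left.sort()
--     right.sort()
--     seek_sequence = []
--     seek_count = 0
--     # If the direction is left (towards 0)
--     if direction == "left":
--         # Process requests to the left of the head
--         for track in reversed(left):
--             seek_sequence.append(track)
--             seek_count += abs(head - track)
--             head = track
--         # After reaching the end of the left requests, move to the start of the disk and then to the right requests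
--         if right:
--             seek_count += abs(head - right[0])
--             head = right[0]
--             for track in right:
--                 seek_sequence.append(track)
--                 seek_count += abs(head - track)
--                 head = track
--     # If the direction is right (towards the end of the disk)
--     elif direction == "right":
--         # Process requests to the right of the head
--         for track in right:
--             seek_sequence.append(track)
--             seek_count += abs(head - track)
--             head = track
--         # After reaching the end of the right requests, move to the start of the disk and then to the left requests
--         if left:
--             seek_count += abs(head - left[-1])
--             head = left[-1]
--             for track in reversed(left):
--                 seek_sequence.append(track)
--                 seek_count += abs(head - track)
--                 head = track
--     return seek_sequence, seek_count
-- ===== SOURCE B (Python) =====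
-- def look_disk_scheduling(requests, head, direction):
--     # Greedy simulation of the LOOK head: keep a pool of pending requests and
--     # repeatedly service the nearest pending request in the current sweep
--     # direction, reversing the sweep once when no request remains ahead.
--     if direction == "left":
--         phases = ("down", "up")
--     elif direction == "right":
--         phases = ("up", "down")
--     else:
--         return [], 0
--     pool = list(requests)
--     pos = head
--     seek_sequence = []
--     seek_count = 0
--     for phase in phases:
--         while True:
--             if phase == "down":
--                 cands = [r for r in pool if r < head]
--                 if not cands:
--                     break
--                 nxt = max(cands)
--             else:
--                 cands = [r for r in pool if r >= head]
--                 if not cands: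
--                     break
--                 nxt = min(cands)
--             pool.remove(nxt)
--             seek_sequence.append(nxt)
--             seek_count += abs(pos - nxt)
--             pos = nxt
--     return seek_sequence, seek_count
-- ===== Notes on version B (the rewrite author's own statement) =====
-- stated objective: alternative
-- what changed: B replaces A's partition-sort-concatenate sweep by a greedy simulation of the disk head: it keeps a pool of pending requests and repeatedly services the nearest pending request in the current sweep direction via max/min selection (removing it from the pool), reversing the sweep once when nothing remains ahead; no sorting or sequence concatenation is performed.
import Mathlib
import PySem

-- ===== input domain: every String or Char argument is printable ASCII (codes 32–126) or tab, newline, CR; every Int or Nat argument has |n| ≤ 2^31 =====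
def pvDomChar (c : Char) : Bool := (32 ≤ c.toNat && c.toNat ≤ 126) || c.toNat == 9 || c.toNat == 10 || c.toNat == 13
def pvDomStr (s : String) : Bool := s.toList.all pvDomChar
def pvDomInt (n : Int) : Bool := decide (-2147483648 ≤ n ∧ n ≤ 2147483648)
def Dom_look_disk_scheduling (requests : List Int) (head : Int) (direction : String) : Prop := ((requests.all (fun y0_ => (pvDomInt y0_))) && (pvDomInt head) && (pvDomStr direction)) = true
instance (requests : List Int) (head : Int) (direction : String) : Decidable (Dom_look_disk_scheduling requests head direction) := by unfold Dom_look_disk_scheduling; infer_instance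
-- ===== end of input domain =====

-- B replaces A's partition-sort-and-sweep by a greedy simulation: it keeps a pool of
-- pending requests and repeatedly services the nearest pending request in the current
-- sweep direction (max/min selection), reversing the sweep once (alternative; same result).

-- ===== PORT A =====
-- one iteration of A's 'for track in …' loops: state (seek_sequence, seek_count, head)
def lookStepA (st : List Int × Int × Int) (t : Int) : List Int × Int × Int :=
  (st.1 ++ [t], st.2.1 + |st.2.2 - t|, t)

def look_disk_scheduling (requests : List Int) (head : Int) (direction : String) : List Int × Int :=
  let left := PySem.List.sorted (requests.filter (fun r => decide (r < head))) (fun x => x) false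
  let right := PySem.List.sorted (requests.filter (fun r => decide (head ≤ r))) (fun x => x) false
  if direction = "left" then
    let st := left.reverse.foldl lookStepA ([], 0, head)
    match right with
    | [] => (st.1, st.2.1)
    | r0 :: _ =>
      let st2 := right.foldl lookStepA (st.1, st.2.1 + |st.2.2 - r0|, r0)
      (st2.1, st2.2.1)
  else if direction = "right" then
    let st := right.foldl lookStepA ([], 0, head)
    -- 'if left:' with head := left[-1]; reversed(left) starts with that same element
    match left.reverse with
    | [] => (st.1, st.2.1)
    | l0 :: _ =>
      let st2 := left.reverse.foldl lookStepA (st.1, st.2.1 + |st.2.2 - l0|, l0)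
      (st2.1, st2.2.1)
  else ([], 0)

-- ===== PORT B =====
-- one loop body of B's 'while True': candidates ahead in the sweep direction, break if none
def pvSelect (down : Bool) (head0 : Int) (pool : List Int) : Option Int :=
  if down then PySem.List.max? (pool.filter (fun r => decide (r < head0))) (fun x => x)
  else PySem.List.min? (pool.filter (fun r => decide (head0 ≤ r))) (fun x => x)

-- B's 'while True' loop for one phase; fuel = pool length at entry is only a totality
-- guard (each iteration removes one pool element). Returns (seq, count, pos, pool).
def pvPhase (down : Bool) (head0 : Int) : Nat → List Int → Int → List Int × Int × Int × List Int
  | 0, pool, pos => ([], 0, pos, pool)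
  | fuel + 1, pool, pos =>
    match pvSelect down head0 pool with
    | none => ([], 0, pos, pool)
    | some nxt =>
      let pool' := (PySem.List.remove? pool nxt).getD []
      let rest := pvPhase down head0 fuel pool' nxt
      (nxt :: rest.1, |pos - nxt| + rest.2.1, rest.2.2.1, rest.2.2.2)

def look_disk_scheduling_alt (requests : List Int) (head : Int) (direction : String) : List Int × Int :=
  if direction = "left" then
    let r1 := pvPhase true head requests.length requests head
    let r2 := pvPhase false head r1.2.2.2.length r1.2.2.2 r1.2.2.1
    (r1.1 ++ r2.1, r1.2.1 + r2.2.1)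
  else if direction = "right" then
    let r1 := pvPhase false head requests.length requests head
    let r2 := pvPhase true head r1.2.2.2.length r1.2.2.2 r1.2.2.1
    (r1.1 ++ r2.1, r1.2.1 + r2.2.1)
  else ([], 0)

-- ===== PRECONDITION & SPEC =====
def Spec_look_disk_scheduling (requests : List Int) (head : Int) (direction : String) (out : List Int × Int) : Prop := out = look_disk_scheduling_alt requests head direction
instance (requests : List Int) (head : Int) (direction : String) (out : List Int × Int) : Decidable (Spec_look_disk_scheduling requests head direction out) := by unfold Spec_look_disk_scheduling; infer_instance

-- ===== CLAIM (what is proved, stated in full; the proofs are below) =====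
def Claim_equal_look_disk_scheduling : Prop := ∀ (requests : List Int) (head : Int) (direction : String), Dom_look_disk_scheduling requests head direction → Spec_look_disk_scheduling requests head direction (look_disk_scheduling requests head direction)

-- ===== LEMMAS AND PROOFS =====

-- total seek cost of visiting l from position h, recursively
def pvCost (h : Int) (l : List Int) : Int :=
  match l with
  | [] => 0
  | t :: ts => |h - t| + pvCost t ts

theorem pvCost_cons_self (y : Int) (ys : List Int) : pvCost y (y :: ys) = pvCost y ys := by
  simp [pvCost]

theorem foldl_lookStepA (l : List Int) (s : List Int) (c h : Int) :
    l.foldl lookStepA (s, c, h) = (s ++ l, c + pvCost h l, l.getLastD h) := by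
  induction l generalizing s c h with
  | nil => simp [pvCost]
  | cons t ts ih =>
      simp only [List.foldl_cons, lookStepA]
      rw [ih]
      simp only [Prod.mk.injEq, List.getLastD_cons]
      exact ⟨by simp, by simp [pvCost]; ring, trivial⟩

-- the down-sweep: repeated max-selection below head0 yields a descending arrangement
-- of exactly the < head0 requests, accumulates the path cost, ends at the last stop,
-- and leaves the ≥ head0 requests (up to permutation) in the pool
theorem pvPhase_down (head0 : Int) (fuel : Nat) :
    ∀ (pool : List Int) (pos : Int),
      (pool.filter (fun r => decide (r < head0))).length ≤ fuel →
      ∃ s pool',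
        pvPhase true head0 fuel pool pos = (s, pvCost pos s, s.getLastD pos, pool') ∧
        s.Perm (pool.filter (fun r => decide (r < head0))) ∧
        s.Pairwise (fun a b => b ≤ a) ∧
        (pool'.filter (fun r => decide (head0 ≤ r))).Perm (pool.filter (fun r => decide (head0 ≤ r))) := by
  induction fuel with
  | zero =>
      intro pool pos hf
      refine ⟨[], pool, by simp [pvPhase, pvCost], ?_, by simp, List.Perm.refl _⟩
      rw [List.length_eq_zero_iff.mp (Nat.le_zero.mp hf)]
  | succ n ih =>
      intro pool pos hf
      cases hsel : pvSelect true head0 pool with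
      | none =>
          have hnil : pool.filter (fun r => decide (r < head0)) = [] := by
            simpa [pvSelect, PySem.List.max?_eq_none_iff] using hsel
          exact ⟨[], pool, by simp [pvPhase, hsel, pvCost], by rw [hnil], by simp, List.Perm.refl _⟩
      | some nxt =>
          have hmemf : nxt ∈ pool.filter (fun r => decide (r < head0)) :=
            PySem.List.max?_mem (by simpa [pvSelect] using hsel)
          have hmem : nxt ∈ pool := (List.mem_filter.mp hmemf).1
          have hlt : nxt < head0 := by simpa using (List.mem_filter.mp hmemf).2
          have hmax : ∀ y ∈ pool.filter (fun r => decide (r < head0)), y ≤ nxt :=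
            PySem.List.max?_isMax (by simpa [pvSelect] using hsel)
          have hrem : PySem.List.remove? pool nxt = some (pool.erase nxt) :=
            PySem.List.remove?_eq_some_erase pool nxt hmem
          have hpc : pool.Perm (nxt :: pool.erase nxt) := List.perm_cons_erase hmem
          have hpf : (pool.filter (fun r => decide (r < head0))).Perm
              (nxt :: (pool.erase nxt).filter (fun r => decide (r < head0))) := by
            have := hpc.filter (fun r => decide (r < head0))
            simpa [List.filter_cons, hlt] using this
          have hlen : ((pool.erase nxt).filter (fun r => decide (r < head0))).length ≤ n := by
            have := hpf.length_eq
            simp at this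
            omega
          obtain ⟨s, pool', heq, hperm, hpair, hge⟩ := ih (pool.erase nxt) nxt hlen
          refine ⟨nxt :: s, pool', ?_, ?_, ?_, ?_⟩
          · simp only [pvPhase, hsel, hrem, Option.getD_some, heq, pvCost, List.getLastD_cons]
          · exact (List.Perm.cons nxt hperm).trans hpf.symm
          · refine List.pairwise_cons.mpr ⟨?_, hpair⟩
            intro y hy
            have hyf : y ∈ (pool.erase nxt).filter (fun r => decide (r < head0)) := hperm.mem_iff.mp hy
            have : y ∈ pool.filter (fun r => decide (r < head0)) := by
              rcases List.mem_filter.mp hyf with ⟨h1, h2⟩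
              exact List.mem_filter.mpr ⟨(List.erase_sublist ..).mem h1, h2⟩
            exact hmax y this
          · refine hge.trans ?_
            have := hpc.filter (fun r => decide (head0 ≤ r))
            have hnot : ¬ head0 ≤ nxt := by omega
            simpa [List.filter_cons, hnot] using this.symm

-- the up-sweep twin: repeated min-selection at or above head0
theorem pvPhase_up (head0 : Int) (fuel : Nat) :
    ∀ (pool : List Int) (pos : Int),
      (pool.filter (fun r => decide (head0 ≤ r))).length ≤ fuel →
      ∃ s pool',
        pvPhase false head0 fuel pool pos = (s, pvCost pos s, s.getLastD pos, pool') ∧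
        s.Perm (pool.filter (fun r => decide (head0 ≤ r))) ∧
        s.Pairwise (fun a b => a ≤ b) ∧
        (pool'.filter (fun r => decide (r < head0))).Perm (pool.filter (fun r => decide (r < head0))) := by
  induction fuel with
  | zero =>
      intro pool pos hf
      refine ⟨[], pool, by simp [pvPhase, pvCost], ?_, by simp, List.Perm.refl _⟩
      rw [List.length_eq_zero_iff.mp (Nat.le_zero.mp hf)]
  | succ n ih =>
      intro pool pos hf
      cases hsel : pvSelect false head0 pool with
      | none =>
          have hnil : pool.filter (fun r => decide (head0 ≤ r)) = [] := by
            simpa [pvSelect, PySem.List.min?_eq_none_iff] using hsel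
          exact ⟨[], pool, by simp [pvPhase, hsel, pvCost], by rw [hnil], by simp, List.Perm.refl _⟩
      | some nxt =>
          have hmemf : nxt ∈ pool.filter (fun r => decide (head0 ≤ r)) :=
            PySem.List.min?_mem (by simpa [pvSelect] using hsel)
          have hmem : nxt ∈ pool := (List.mem_filter.mp hmemf).1
          have hge0 : head0 ≤ nxt := by simpa using (List.mem_filter.mp hmemf).2
          have hmin : ∀ y ∈ pool.filter (fun r => decide (head0 ≤ r)), nxt ≤ y :=
            PySem.List.min?_isMin (by simpa [pvSelect] using hsel)
          have hrem : PySem.List.remove? pool nxt = some (pool.erase nxt) :=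
            PySem.List.remove?_eq_some_erase pool nxt hmem
          have hpc : pool.Perm (nxt :: pool.erase nxt) := List.perm_cons_erase hmem
          have hpf : (pool.filter (fun r => decide (head0 ≤ r))).Perm
              (nxt :: (pool.erase nxt).filter (fun r => decide (head0 ≤ r))) := by
            have := hpc.filter (fun r => decide (head0 ≤ r))
            simpa [List.filter_cons, hge0] using this
          have hlen : ((pool.erase nxt).filter (fun r => decide (head0 ≤ r))).length ≤ n := by
            have := hpf.length_eq
            simp at this
            omega
          obtain ⟨s, pool', heq, hperm, hpair, hlt'⟩ := ih (pool.erase nxt) nxt hlen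
          refine ⟨nxt :: s, pool', ?_, ?_, ?_, ?_⟩
          · simp only [pvPhase, hsel, hrem, Option.getD_some, heq, pvCost, List.getLastD_cons]
          · exact (List.Perm.cons nxt hperm).trans hpf.symm
          · refine List.pairwise_cons.mpr ⟨?_, hpair⟩
            intro y hy
            have hyf : y ∈ (pool.erase nxt).filter (fun r => decide (head0 ≤ r)) := hperm.mem_iff.mp hy
            have : y ∈ pool.filter (fun r => decide (head0 ≤ r)) := by
              rcases List.mem_filter.mp hyf with ⟨h1, h2⟩
              exact List.mem_filter.mpr ⟨(List.erase_sublist ..).mem h1, h2⟩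
            exact hmin y this
          · refine hlt'.trans ?_
            have := hpc.filter (fun r => decide (r < head0))
            have hnot : ¬ nxt < head0 := by omega
            simpa [List.filter_cons, hnot] using this.symm

-- ===== VERDICT (by name: the statement is the Claim_ definition above) =====
theorem look_disk_scheduling_spec : Claim_equal_look_disk_scheduling := by
  intro requests head direction _
  unfold Spec_look_disk_scheduling look_disk_scheduling look_disk_scheduling_alt
  by_cases hl : direction = "left"
  · subst hl
    simp only [reduceIte, String.reduceEq]
    obtain ⟨s1, pool1, h1, hperm1, hpair1, hge1⟩ :=
      pvPhase_down head requests.length requests head (List.length_filter_le _ _)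
    obtain ⟨s2, pool2, h2, hperm2, hpair2, _⟩ :=
      pvPhase_up head pool1.length pool1 (s1.getLastD head) (List.length_filter_le _ _)
    have hL : PySem.List.sorted (requests.filter (fun r => decide (r < head))) (fun x => x) false
        = s1.reverse :=
      PySem.List.sorted_id_eq_of_perm_of_pairwise _ _ (s1.reverse_perm.trans hperm1)
        (List.pairwise_reverse.mpr hpair1)
    have hR : PySem.List.sorted (requests.filter (fun r => decide (head ≤ r))) (fun x => x) false
        = s2 :=
      PySem.List.sorted_id_eq_of_perm_of_pairwise _ _ (hperm2.trans hge1) hpair2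
    rw [hL, hR, h1]
    simp only [List.reverse_reverse]
    rw [h2]
    cases hs2 : s2 with
    | nil => simp [foldl_lookStepA, pvCost]
    | cons r0 rs =>
        simp only [foldl_lookStepA, List.nil_append, List.getLastD_cons, zero_add]
        simp only [Prod.mk.injEq]
        refine ⟨trivial, ?_⟩
        rw [pvCost_cons_self]
        simp only [pvCost]
        ring
  · by_cases hr : direction = "right"
    · subst hr
      simp only [reduceIte, String.reduceEq]
      obtain ⟨s1, pool1, h1, hperm1, hpair1, hlt1⟩ :=
        pvPhase_up head requests.length requests head (List.length_filter_le _ _)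
      obtain ⟨s2, pool2, h2, hperm2, hpair2, _⟩ :=
        pvPhase_down head pool1.length pool1 (s1.getLastD head) (List.length_filter_le _ _)
      have hR : PySem.List.sorted (requests.filter (fun r => decide (head ≤ r))) (fun x => x) false
          = s1 :=
        PySem.List.sorted_id_eq_of_perm_of_pairwise _ _ hperm1 hpair1
      have hL : PySem.List.sorted (requests.filter (fun r => decide (r < head))) (fun x => x) false
          = s2.reverse :=
        PySem.List.sorted_id_eq_of_perm_of_pairwise _ _ (s2.reverse_perm.trans (hperm2.trans hlt1))
          (List.pairwise_reverse.mpr hpair2)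
      rw [hL, hR, h1]
      simp only [List.reverse_reverse]
      rw [h2]
      cases hs2 : s2 with
      | nil => simp [foldl_lookStepA, pvCost]
      | cons l0 ls =>
          simp only [foldl_lookStepA, List.nil_append, List.getLastD_cons, zero_add]
          simp only [Prod.mk.injEq]
          refine ⟨trivial, ?_⟩
          rw [pvCost_cons_self]
          simp only [pvCost]
          ring
    · simp [hl, hr]
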